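-- pv_equiv track=rewrite | github.com/zcvfcat/algorithm | .archive/2022-하반기-알고리즘/programmers-고득점-sdk/7. 동적계획법/사칙연산.py | solution
-- ===== SOURCE A (Python) =====
-- def solution(numbers):
--     min_max = [0, 0]
--     sum_value = 0
--     for idx in range(len(numbers)-1, -1, -1):
--         if numbers[idx] == '+':
--             continue
--
--         elif numbers[idx] == '-':
--             temp_min, temp_max = min_max
--             min_max[0] = min(-(sum_value + temp_max), -sum_value+temp_min)
--             # -(sum + max):-가 식전체에 붙는 경우, -sum+min:-가 이전 -값 앞까지만 붙는 경우
--             minus_v = int(numbers[idx+1])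
--
--             min_max[1] = max(-(sum_value + temp_min), -minus_v + (sum_value-minus_v) + temp_max)
--             # -(sum + min):-가 식전체에 붙는 경우, -v+(sum-v)+max:-가 바로 뒤의 값에만 붙는 경우
--             sum_value = 0
--         elif int(numbers[idx]) >= 0:
--             sum_value += int(numbers[idx])
--     min_max[1] += sum_value
--     return min_max[1]
-- ===== SOURCE B (Python) =====
-- def solution(numbers):
--     # Closed form on the minus-group structure instead of A's min/max state machine.
--     # Tokens split at '-' signs into groups; each group keeps (sum of its
--     # nonnegative operands, the operand attached to its '-').  The answer is
--     # total - 2 * p where the penalty pair is folded right-to-left over groups: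
--     #   p, q  <-  min(groupSum + q, attached + p), min(p, q)
--     total = 0
--     groups = []          # [sum of nonnegative operands, attached operand]
--     expect = False       # the next number is the operand attached to the last '-'
--     for t in numbers:
--         if t == '-':
--             groups.append([0, 0])
--             expect = True
--         elif t != '+':
--             v = int(t)
--             if expect:
--                 groups[-1][1] = v
--                 expect = False
--             if v >= 0:
--                 total += v
--                 if groups:
--                     groups[-1][0] += v
--     if not groups:
--         return total
--     p = q = 0
--     for g, v in reversed(groups):
--         p, q = min(g + q, v + p), min(p, q)
--     return total - 2 * p
-- ===== Notes on version B (the rewrite author's own statement) =====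
-- stated objective: alternative
-- what changed: Replaces A's right-to-left three-variable min/max state machine by a left-to-right split into minus-groups followed by a closed-form penalty-pair fold: answer = total - 2*p with (p,q) <- (min(groupSum+q, attached+p), min(p,q)) folded over the groups.
import Mathlib
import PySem

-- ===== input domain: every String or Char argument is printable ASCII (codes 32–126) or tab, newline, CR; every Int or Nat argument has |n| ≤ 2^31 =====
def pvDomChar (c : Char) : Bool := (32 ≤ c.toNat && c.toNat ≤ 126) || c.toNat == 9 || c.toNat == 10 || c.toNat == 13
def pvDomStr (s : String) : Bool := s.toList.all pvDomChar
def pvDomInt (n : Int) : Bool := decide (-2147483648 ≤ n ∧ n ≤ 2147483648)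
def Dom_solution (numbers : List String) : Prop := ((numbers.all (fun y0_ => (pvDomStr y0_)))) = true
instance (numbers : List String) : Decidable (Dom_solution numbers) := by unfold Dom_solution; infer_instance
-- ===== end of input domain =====

-- B replaces A's right-to-left min/max state machine by a minus-group split plus a
-- closed-form penalty-pair fold (total - 2 * p); same O(n) cost.


-- int(t); Pre_ guarantees the parse succeeds wherever Python calls int()
def intOf (t : String) : Int := (PySem.Int.ofStr? t).getD 0

-- ===== PORT A =====
-- one iteration of A's `for idx in range(len(numbers)-1, -1, -1)` loop;
-- state = (min_max[0], min_max[1], sum_value)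
def solStep (numbers : List String) (st : Int × Int × Int) (idx : Int) : Int × Int × Int :=
  let tok := PySem.List.pyGetD numbers idx ""
  if tok = "+" then st
  else if tok = "-" then
    let m' := min (-(st.2.2 + st.2.1)) (-st.2.2 + st.1)
    let v := intOf (PySem.List.pyGetD numbers (idx + 1) "")
    let M' := max (-(st.2.2 + st.1)) (-v + (st.2.2 - v) + st.2.1)
    (m', M', 0)
  else if 0 ≤ intOf tok then (st.1, st.2.1, st.2.2 + intOf tok)
  else st

def solution (numbers : List String) : Int :=
  let r := (PySem.List.pyRange ((numbers.length : Int) - 1) (-1) (-1)).foldl (solStep numbers) (0, 0, 0)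
  r.2.1 + r.2.2

-- ===== PORT B =====
-- one iteration of B's `for t in numbers` loop; state = (total, groups, expect)
def bStep (st : Int × List (Int × Int) × Bool) (t : String) : Int × List (Int × Int) × Bool :=
  if t = "-" then (st.1, st.2.1 ++ [(0, 0)], true)
  else if t ≠ "+" then
    let v := intOf t
    -- `if expect: groups[-1][1] = v; expect = False`
    let gs := if st.2.2 then st.2.1.dropLast ++ [((st.2.1.getLastD (0, 0)).1, v)] else st.2.1
    let e := if st.2.2 then false else st.2.2
    -- `if v >= 0: total += v; if groups: groups[-1][0] += v`
    if 0 ≤ v then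
      if gs = [] then (st.1 + v, gs, e)
      else (st.1 + v, gs.dropLast ++ [((gs.getLastD (0, 0)).1 + v, (gs.getLastD (0, 0)).2)], e)
    else (st.1, gs, e)
  else st

def solution_alt (numbers : List String) : Int :=
  let st := numbers.foldl bStep (0, ([] : List (Int × Int)), false)
  if st.2.1 = [] then st.1
  else
    let pq := st.2.1.reverse.foldl
      (fun pq gv => (min (gv.1 + pq.2) (gv.2 + pq.1), min pq.1 pq.2)) ((0 : Int), (0 : Int))
    st.1 - 2 * pq.1

-- ===== PRECONDITION & SPEC =====
-- exactly the inputs on which A returns: every token is '+', '-' or int-parseable,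
-- and every '-' is followed by an int-parseable token (else int()/IndexError raises)
def wfHead (t : String) (rest : List String) : Bool :=
  if t = "-" then
    (match rest with
      | [] => false
      | u :: _ => (PySem.Int.ofStr? u).isSome)
  else (t = "+" || (PySem.Int.ofStr? t).isSome)

def wfSoup : List String → Bool
  | [] => true
  | t :: rest => wfHead t rest && wfSoup rest

def Pre_solution (numbers : List String) : Prop := wfSoup numbers = true
instance (numbers : List String) : Decidable (Pre_solution numbers) := by
  unfold Pre_solution; infer_instance

def pvWitness_solution : List String := ["5", "-", "1", "+", "2"]

def Spec_solution (numbers : List String) (out : Int) : Prop := out = solution_alt numbers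
instance (numbers : List String) (out : Int) : Decidable (Spec_solution numbers out) := by
  unfold Spec_solution; infer_instance

-- ===== CLAIM (what is proved, stated in full; the proofs are below) =====
def Claim_equal_solution : Prop := ∀ (numbers : List String), Dom_solution numbers → Pre_solution numbers → Spec_solution numbers (solution numbers)

-- ===== LEMMAS AND PROOFS =====

-- A's countdown fold as a structural recursion
def recAS : List String → Int × Int × Int
  | [] => (0, 0, 0)
  | t :: ts => solStep (t :: ts) (recAS ts) 0

-- the suffix starting at the first '-' token
def findRest : List String → List String
  | [] => []
  | t :: tl => if t = "-" then t :: tl else findRest tl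

-- sum of the nonnegative integer tokens (A only adds values with int(...) >= 0)
def sumNums : List String → Int
  | [] => 0
  | t :: rest =>
    (if t = "+" || t = "-" then 0 else if 0 ≤ intOf t then intOf t else 0) + sumNums rest

-- sum of the nonnegative integer tokens before the first '-'
def leadNums : List String → Int
  | [] => 0
  | t :: rest =>
    if t = "-" then 0
    else (if t = "+" then 0 else if 0 ≤ intOf t then intOf t else 0) + leadNums rest

-- value of the first integer token before the first '-' (default d)
def headNumD : List String → Int → Int
  | [], d => d
  | t :: rest, d => if t = "-" then d else if t = "+" then headNumD rest d else intOf t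

-- (sum, first value) of each minus-group
def groupsOf : List String → List (Int × Int)
  | [] => []
  | t :: rest =>
    if t = "-" then (leadNums rest, headNumD rest 0) :: groupsOf rest else groupsOf rest

def pqStep (gv : Int × Int) (pq : Int × Int) : Int × Int :=
  (min (gv.1 + pq.2) (gv.2 + pq.1), min pq.1 pq.2)

def PQ (ts : List String) : Int × Int := (groupsOf ts).foldr pqStep (0, 0)

theorem parse_ne {t : String} (h : (PySem.Int.ofStr? t).isSome = true) :
    t ≠ "+" ∧ t ≠ "-" := by
  constructor <;> rintro rfl <;> exact absurd h (by decide)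

-- ---- A's countdown fold is the structural recursion recAS ----

theorem solStep_shift (t : String) (ts : List String) (st : Int × Int × Int) (k : Nat) :
    solStep (t :: ts) st ((k : Int) + 1) = solStep ts st (k : Int) := by
  have h1 : PySem.List.pyGetD (t :: ts) ((k : Int) + 1) "" = PySem.List.pyGetD ts (k : Int) "" := by
    rw [show ((k : Int) + 1) = (((k + 1 : Nat)) : Int) by push_cast; ring,
        PySem.List.pyGetD_natCast, PySem.List.pyGetD_natCast]
    rfl
  have h2 : PySem.List.pyGetD (t :: ts) ((k : Int) + 1 + 1) ""
      = PySem.List.pyGetD ts ((k : Int) + 1) "" := by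
    rw [show ((k : Int) + 1 + 1) = (((k + 2 : Nat)) : Int) by push_cast; ring,
        show ((k : Int) + 1) = (((k + 1 : Nat)) : Int) by push_cast; ring,
        PySem.List.pyGetD_natCast, PySem.List.pyGetD_natCast]
    rfl
  unfold solStep
  rw [h1, h2]

theorem foldr_recAS (ts : List String) :
    (List.range ts.length).foldr (fun (k : Nat) st => solStep ts st (k : Int)) (0, 0, 0)
      = recAS ts := by
  induction ts with
  | nil => simp [recAS]
  | cons t ts ih =>
    rw [List.length_cons, List.range_succ_eq_map, List.foldr_cons, List.foldr_map]
    have hshift : ∀ (k : Nat) (st : Int × Int × Int),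
        solStep (t :: ts) st ((Nat.succ k : Nat) : Int) = solStep ts st (k : Int) := by
      intro k st
      have h := solStep_shift t ts st k
      rw [← h]
      norm_cast
    simp only [hshift]
    rw [ih]
    simp [recAS]

theorem fold_eq_recAS (ts : List String) :
    (PySem.List.pyRange ((ts.length : Int) - 1) (-1) (-1)).foldl (solStep ts) (0, 0, 0)
      = recAS ts := by
  rw [PySem.List.pyRange_neg_one,
      show (((ts.length : Int) - 1) - (-1)) = (ts.length : Int) by ring, Int.toNat_natCast]
  have hmap : (List.range ts.length).map (fun (k : Nat) => ((ts.length : Int) - 1 - (k : Int)))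
      = ((List.range ts.length).reverse).map (fun (k : Nat) => (k : Int)) := by
    conv_rhs => rw [List.range_eq_range', List.reverse_range', List.map_map]
    rw [List.range_eq_range']
    refine List.map_congr_left ?_
    intro k hk
    rw [List.mem_range'] at hk
    simp only [Function.comp]
    omega
  rw [hmap, List.map_reverse, List.foldl_reverse, List.foldr_map]
  exact foldr_recAS ts

theorem solution_eq_recAS (ts : List String) :
    solution ts = (recAS ts).2.1 + (recAS ts).2.2 := by
  show ((PySem.List.pyRange ((ts.length : Int) - 1) (-1) (-1)).foldl (solStep ts) (0, 0, 0)).2.1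
      + ((PySem.List.pyRange ((ts.length : Int) - 1) (-1) (-1)).foldl (solStep ts) (0, 0, 0)).2.2
      = _
  rw [fold_eq_recAS ts]

-- ---- arithmetic bookkeeping on the token structure ----

theorem sum_split : ∀ (ts : List String),
    sumNums ts = leadNums ts + (match findRest ts with
      | [] => 0
      | _ :: tl => sumNums tl)
  | [] => by simp [sumNums, leadNums, findRest]
  | t :: rest => by
    by_cases ht : t = "-"
    · subst ht
      rw [findRest, if_pos rfl]
      simp [sumNums, leadNums]
    · have h1 : sumNums (t :: rest)
          = (if t = "+" || t = "-" then 0 else if 0 ≤ intOf t then intOf t else 0)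
            + sumNums rest := rfl
      have h2 : leadNums (t :: rest)
          = (if t = "+" then 0 else if 0 ≤ intOf t then intOf t else 0) + leadNums rest := by
        rw [leadNums, if_neg ht]
      have h3 : findRest (t :: rest) = findRest rest := by rw [findRest, if_neg ht]
      rw [h1, h2, h3, sum_split rest]
      have : (if t = "+" || t = "-" then (0 : Int) else if 0 ≤ intOf t then intOf t else 0)
          = (if t = "+" then 0 else if 0 ≤ intOf t then intOf t else 0) := by
        by_cases h : t = "+" <;> simp [h, ht]
      rw [this]
      cases findRest rest <;> dsimp only <;> ring
  termination_by ts => ts.length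

theorem groupsOf_char : ∀ (ts : List String),
    (findRest ts = [] → groupsOf ts = []) ∧
    (∀ z tl, findRest ts = z :: tl →
      groupsOf ts = (leadNums tl, headNumD tl 0) :: groupsOf tl)
  | [] => by simp [findRest, groupsOf]
  | t :: rest => by
    by_cases ht : t = "-"
    · subst ht
      constructor
      · intro h; rw [findRest, if_pos rfl] at h; exact absurd h (by simp)
      · intro z tl h
        rw [findRest, if_pos rfl] at h
        injection h with h1 h2
        subst h2
        rw [groupsOf, if_pos rfl]
    · have h3 : findRest (t :: rest) = findRest rest := by rw [findRest, if_neg ht]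
      have h4 : groupsOf (t :: rest) = groupsOf rest := by rw [groupsOf, if_neg ht]
      rw [h3, h4]
      exact groupsOf_char rest
  termination_by ts => ts.length

theorem PQ_skip {t : String} (rest : List String) (ht : t ≠ "-") :
    PQ (t :: rest) = PQ rest := by
  simp only [PQ]
  rw [groupsOf, if_neg ht]

theorem PQ_cons (rest : List String) :
    PQ ("-" :: rest) = pqStep (leadNums rest, headNumD rest 0) (PQ rest) := by
  simp only [PQ]
  rw [groupsOf, if_pos rfl, List.foldr_cons]

-- ---- characterization of A's state machine ----

theorem recAS_char : ∀ (ts : List String), wfSoup ts = true →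
    recAS ts = (match findRest ts with
      | [] => (0, 0, sumNums ts)
      | _ :: tl => (-(sumNums tl) + 2 * (PQ ts).2, sumNums tl - 2 * (PQ ts).1, leadNums ts))
  | [], _ => by simp [recAS, findRest, sumNums]
  | t :: rest, hw => by
    rw [wfSoup, Bool.and_eq_true] at hw
    obtain ⟨hhead, hwr⟩ := hw
    have ih := recAS_char rest hwr
    have hstep : recAS (t :: rest) = solStep (t :: rest) (recAS rest) 0 := rfl
    by_cases htp : t = "+"
    · -- '+' token: A's state is unchanged
      subst htp
      have hskip : recAS ("+" :: rest) = recAS rest := by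
        rw [hstep]; unfold solStep
        rw [PySem.List.pyGetD_zero_cons, if_pos rfl]
      have h3 : findRest ("+" :: rest) = findRest rest := by rw [findRest]; rfl
      have h4 : sumNums ("+" :: rest) = sumNums rest := by simp [sumNums]
      have h5 : leadNums ("+" :: rest) = leadNums rest := by simp [leadNums]
      have h6 := PQ_skip rest (show ("+" : String) ≠ "-" by decide)
      rw [hskip, ih, h3, h4, h5, h6]
    · by_cases htm : t = "-"
      · -- '-' token: the minus step fires with v = int of the next token
        subst htm
        have hy : ∃ u rest2, rest = u :: rest2 ∧ (PySem.Int.ofStr? u).isSome = true := by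
          unfold wfHead at hhead
          rw [if_pos rfl] at hhead
          cases rest with
          | nil => simp at hhead
          | cons u r2 => exact ⟨u, r2, rfl, by simpa using hhead⟩
        obtain ⟨u, rest2, rfl, hu⟩ := hy
        obtain ⟨hup, hum⟩ := parse_ne hu
        have hget1 : PySem.List.pyGetD ("-" :: u :: rest2) ((0 : Int) + 1) "" = u := by
          rw [show ((0 : Int) + 1) = (((1 : Nat)) : Int) by norm_num,
              PySem.List.pyGetD_natCast]
          rfl
        have hminus : recAS ("-" :: u :: rest2)
            = (min (-((recAS (u :: rest2)).2.2 + (recAS (u :: rest2)).2.1))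
                   (-(recAS (u :: rest2)).2.2 + (recAS (u :: rest2)).1),
               max (-((recAS (u :: rest2)).2.2 + (recAS (u :: rest2)).1))
                   (-(intOf u) + ((recAS (u :: rest2)).2.2 - intOf u)
                     + (recAS (u :: rest2)).2.1),
               0) := by
          rw [hstep]; unfold solStep
          rw [PySem.List.pyGetD_zero_cons]
          rw [if_neg (by decide), if_pos rfl, hget1]
        have hfr : findRest ("-" :: u :: rest2) = "-" :: u :: rest2 := by
          rw [findRest, if_pos rfl]
        have hhn : headNumD (u :: rest2) 0 = intOf u := by
          rw [headNumD, if_neg hum, if_neg hup]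
        have hpq : PQ ("-" :: u :: rest2)
            = (min (leadNums (u :: rest2) + (PQ (u :: rest2)).2)
                   (intOf u + (PQ (u :: rest2)).1),
               min (PQ (u :: rest2)).1 (PQ (u :: rest2)).2) := by
          rw [PQ_cons (u :: rest2)]
          unfold pqStep
          rw [hhn]
        have hsplit := sum_split (u :: rest2)
        have hlead0 : leadNums ("-" :: u :: rest2) = 0 := by rw [leadNums, if_pos rfl]
        rw [hminus, ih, hfr, hpq, hlead0]
        cases hf : findRest (u :: rest2) with
        | nil =>
          rw [hf] at hsplit
          simp only at hsplit
          have hg0 := (groupsOf_char (u :: rest2)).1 hf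
          have hp0 : PQ (u :: rest2) = (0, 0) := by unfold PQ; rw [hg0]; rfl
          rw [hp0]
          simp only [Prod.mk.injEq]
          refine ⟨?_, ?_, trivial⟩
          · rw [min_eq_left (by omega)]
            rw [min_eq_left (by omega)]
            omega
          · rcases le_total (leadNums (u :: rest2) + 0) (intOf u + 0) with hle | hle
            · rw [min_eq_left hle, max_eq_left (by omega)]; omega
            · rw [min_eq_right hle, max_eq_right (by omega)]; omega
        | cons z tl =>
          rw [hf] at hsplit
          simp only at hsplit
          simp only [Prod.mk.injEq]
          refine ⟨?_, ?_, trivial⟩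
          · rcases le_total (PQ (u :: rest2)).1 (PQ (u :: rest2)).2 with hle | hle
            · rw [min_eq_left hle, min_eq_left (by omega)]; omega
            · rw [min_eq_right hle, min_eq_right (by omega)]; omega
          · rcases le_total (leadNums (u :: rest2) + (PQ (u :: rest2)).2)
                (intOf u + (PQ (u :: rest2)).1) with hle | hle
            · rw [min_eq_left hle, max_eq_left (by omega)]; omega
            · rw [min_eq_right hle, max_eq_right (by omega)]; omega
      · -- integer token: A adds its value to sum_value iff it is nonnegative
        have h3 : findRest (t :: rest) = findRest rest := by rw [findRest, if_neg htm]
        have h6 := PQ_skip rest htm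
        by_cases hv : 0 ≤ intOf t
        · have hnum : recAS (t :: rest)
              = ((recAS rest).1, (recAS rest).2.1, (recAS rest).2.2 + intOf t) := by
            rw [hstep]; unfold solStep
            rw [PySem.List.pyGetD_zero_cons]
            rw [if_neg htp, if_neg htm, if_pos hv]
          have h4 : sumNums (t :: rest) = intOf t + sumNums rest := by
            rw [sumNums, if_neg (by simp [htp, htm]), if_pos hv]
          have h5 : leadNums (t :: rest) = intOf t + leadNums rest := by
            rw [leadNums, if_neg htm, if_neg htp, if_pos hv]
          rw [hnum, ih, h3, h6]
          cases hf : findRest rest with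
          | nil =>
            simp only [Prod.mk.injEq]
            refine ⟨trivial, trivial, ?_⟩
            rw [h4]; ring
          | cons z tl =>
            simp only [Prod.mk.injEq]
            refine ⟨trivial, trivial, ?_⟩
            rw [h5]; ring
        · have hnum : recAS (t :: rest) = recAS rest := by
            rw [hstep]; unfold solStep
            rw [PySem.List.pyGetD_zero_cons]
            rw [if_neg htp, if_neg htm, if_neg hv]
          have h4 : sumNums (t :: rest) = sumNums rest := by
            rw [sumNums, if_neg (by simp [htp, htm]), if_neg hv]; ring
          have h5 : leadNums (t :: rest) = leadNums rest := by
            rw [leadNums, if_neg htm, if_neg htp, if_neg hv]; ring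
          rw [hnum, ih, h3, h4, h5, h6]
  termination_by ts => ts.length

-- ---- B's fold builds (total, groups) ----

theorem bfold_open : ∀ (ts : List String) (T : Int) (gs' : List (Int × Int))
    (g w : Int) (e : Bool),
    (ts.foldl bStep (T, gs' ++ [(g, w)], e)).1 = T + sumNums ts ∧
    (ts.foldl bStep (T, gs' ++ [(g, w)], e)).2.1
      = gs' ++ [(g + leadNums ts, if e then headNumD ts w else w)] ++ groupsOf ts
  | [], T, gs', g, w, e => by
    cases e <;> simp [sumNums, leadNums, headNumD, groupsOf]
  | t :: rest, T, gs', g, w, e => by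
    rw [List.foldl_cons]
    by_cases htm : t = "-"
    · subst htm
      have hb : bStep (T, gs' ++ [(g, w)], e) "-" = (T, (gs' ++ [(g, w)]) ++ [(0, 0)], true) := by
        unfold bStep; rw [if_pos rfl]
      rw [hb]
      obtain ⟨i1, i2⟩ := bfold_open rest T (gs' ++ [(g, w)]) 0 0 true
      refine ⟨by rw [i1]; simp [sumNums], ?_⟩
      rw [i2]
      have hlead0 : leadNums ("-" :: rest) = 0 := by rw [leadNums, if_pos rfl]
      have hgrp : groupsOf ("-" :: rest) = (leadNums rest, headNumD rest 0) :: groupsOf rest := by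
        rw [groupsOf, if_pos rfl]
      have hhd : (if e then headNumD ("-" :: rest) w else w) = w := by
        cases e <;> simp [headNumD]
      rw [hlead0, hgrp, hhd]
      simp
    · by_cases htp : t = "+"
      · subst htp
        have hb : bStep (T, gs' ++ [(g, w)], e) "+" = (T, gs' ++ [(g, w)], e) := by
          unfold bStep
          rw [if_neg (by decide)]
          simp
        rw [hb]
        obtain ⟨i1, i2⟩ := bfold_open rest T gs' g w e
        refine ⟨by rw [i1]; simp [sumNums], ?_⟩
        rw [i2]
        have h5 : leadNums ("+" :: rest) = leadNums rest := by simp [leadNums]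
        have hgrp : groupsOf ("+" :: rest) = groupsOf rest := by
          rw [groupsOf, if_neg (by decide)]
        have hhd : (if e then headNumD ("+" :: rest) w else w)
            = (if e then headNumD rest w else w) := by
          cases e <;> simp [headNumD]
        rw [h5, hgrp, hhd]
      · have hb : bStep (T, gs' ++ [(g, w)], e) t
            = (T + (if 0 ≤ intOf t then intOf t else 0),
               gs' ++ [(g + (if 0 ≤ intOf t then intOf t else 0), if e then intOf t else w)],
               false) := by
          unfold bStep
          rw [if_neg htm, if_pos (by simpa using htp)]
          by_cases hv : 0 ≤ intOf t
          · rw [if_pos hv]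
            cases e <;> simp [hv]
          · rw [if_neg hv]
            cases e <;> simp [hv]
        rw [hb]
        obtain ⟨i1, i2⟩ := bfold_open rest (T + (if 0 ≤ intOf t then intOf t else 0)) gs'
          (g + (if 0 ≤ intOf t then intOf t else 0)) (if e then intOf t else w) false
        have h4 : sumNums (t :: rest)
            = (if 0 ≤ intOf t then intOf t else 0) + sumNums rest := by
          rw [sumNums, if_neg (by simp [htp, htm])]
        have h5 : leadNums (t :: rest)
            = (if 0 ≤ intOf t then intOf t else 0) + leadNums rest := by
          rw [leadNums, if_neg htm, if_neg htp]
        have hgrp : groupsOf (t :: rest) = groupsOf rest := by rw [groupsOf, if_neg htm]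
        refine ⟨by rw [i1, h4]; ring, ?_⟩
        rw [i2, h5, hgrp]
        have hhd : (if e then headNumD (t :: rest) w else w) = (if e then intOf t else w) := by
          cases e <;> simp [headNumD, htm, htp]
        rw [hhd]
        have : g + (if 0 ≤ intOf t then intOf t else 0) + leadNums rest
            = g + ((if 0 ≤ intOf t then intOf t else 0) + leadNums rest) := by ring
        rw [this]
        simp
  termination_by ts => ts.length

theorem bfold_closed : ∀ (ts : List String) (T : Int),
    (ts.foldl bStep (T, ([] : List (Int × Int)), false)).1 = T + sumNums ts ∧
    (ts.foldl bStep (T, ([] : List (Int × Int)), false)).2.1 = groupsOf ts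
  | [], T => by simp [sumNums, groupsOf]
  | t :: rest, T => by
    rw [List.foldl_cons]
    by_cases htm : t = "-"
    · subst htm
      have hb : bStep (T, ([] : List (Int × Int)), false) "-"
          = (T, [] ++ [((0 : Int), (0 : Int))], true) := by
        unfold bStep; rw [if_pos rfl]
      rw [hb]
      obtain ⟨i1, i2⟩ := bfold_open rest T [] 0 0 true
      refine ⟨by rw [i1]; simp [sumNums], ?_⟩
      rw [i2]
      have hgrp : groupsOf ("-" :: rest) = (leadNums rest, headNumD rest 0) :: groupsOf rest := by
        rw [groupsOf, if_pos rfl]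
      rw [hgrp]
      simp
    · by_cases htp : t = "+"
      · subst htp
        have hb : bStep (T, ([] : List (Int × Int)), false) "+"
            = (T, ([] : List (Int × Int)), false) := by
          unfold bStep
          rw [if_neg (by decide)]
          simp
        rw [hb]
        obtain ⟨i1, i2⟩ := bfold_closed rest T
        refine ⟨by rw [i1]; simp [sumNums], ?_⟩
        rw [i2, groupsOf, if_neg (by decide)]
      · have hb : bStep (T, ([] : List (Int × Int)), false) t
            = (T + (if 0 ≤ intOf t then intOf t else 0), ([] : List (Int × Int)), false) := by
          unfold bStep
          rw [if_neg htm, if_pos (by simpa using htp)]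
          by_cases hv : 0 ≤ intOf t
          · rw [if_pos hv]; simp [hv]
          · rw [if_neg hv]; simp [hv]
        rw [hb]
        obtain ⟨i1, i2⟩ := bfold_closed rest (T + (if 0 ≤ intOf t then intOf t else 0))
        have h4 : sumNums (t :: rest)
            = (if 0 ≤ intOf t then intOf t else 0) + sumNums rest := by
          rw [sumNums, if_neg (by simp [htp, htm])]
        refine ⟨by rw [i1, h4]; ring, ?_⟩
        rw [i2, groupsOf, if_neg htm]
  termination_by ts => ts.length

theorem alt_char (ts : List String) :
    solution_alt ts = (if groupsOf ts = [] then sumNums ts else sumNums ts - 2 * (PQ ts).1) := by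
  obtain ⟨h1, h2⟩ := bfold_closed ts 0
  show (if (ts.foldl bStep (0, ([] : List (Int × Int)), false)).2.1 = [] then
          (ts.foldl bStep (0, ([] : List (Int × Int)), false)).1
        else (ts.foldl bStep (0, ([] : List (Int × Int)), false)).1
          - 2 * ((ts.foldl bStep (0, ([] : List (Int × Int)), false)).2.1.reverse.foldl
              (fun pq gv => (min (gv.1 + pq.2) (gv.2 + pq.1), min pq.1 pq.2))
              ((0 : Int), (0 : Int))).1) = _
  rw [h1, h2, zero_add, List.foldl_reverse]
  rfl

-- ===== VERDICT (by name: the statement is the Claim_ definition above) =====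
theorem solution_spec : Claim_equal_solution := by
  intro numbers _ hpre
  unfold Spec_solution
  rw [solution_eq_recAS, recAS_char numbers hpre, alt_char numbers]
  cases hf : findRest numbers with
  | nil =>
    rw [if_pos ((groupsOf_char numbers).1 hf)]
    show (0 : Int) + sumNums numbers = sumNums numbers
    omega
  | cons z tl =>
    have hg := (groupsOf_char numbers).2 z tl hf
    rw [if_neg (by rw [hg]; simp)]
    have hsplit := sum_split numbers
    rw [hf] at hsplit
    simp only at hsplit
    show sumNums tl - 2 * (PQ numbers).1 + leadNums numbers
        = sumNums numbers - 2 * (PQ numbers).1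
    omega
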